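-- pv_equiv track=rewrite | github.com/TimothyJNeale/OpenAI-Bootcamp | exam-cretor.py | create_student_view
-- ===== SOURCE A (Python) =====
-- def create_student_view(test, num_questions):
--     student_view = {1: ''}
--     question_number  = 1
--     for line in test.split("\n"):
--         if not line.startswith('Correct Answer'):
--             student_view[question_number] += line + '\n'
--         elif question_number < num_questions :
--             question_number += 1
--             student_view[question_number] = ''
--
--     return student_view
-- ===== SOURCE B (Python) =====
-- # Different decomposition: recursively split the exam into segments at
-- # 'Correct Answer' delimiter lines, then number the segments 1.. .
-- def create_student_view(test, num_questions):
--     parts = _build(test.split('\n'), num_questions)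
--     return {i + 1: p for i, p in enumerate(parts)}
--
-- def _build(lines, remaining):
--     if remaining > 1:
--         for i, l in enumerate(lines):
--             if l.startswith('Correct Answer'):
--                 return [''.join(x + '\n' for x in lines[:i])] + _build(lines[i + 1:], remaining - 1)
--     return [''.join(x + '\n' for x in lines if not x.startswith('Correct Answer'))]
-- ===== Notes on version B (the rewrite author's own statement) =====
-- stated objective: alternative
-- what changed: A accumulates questions in a dict while tracking a mutable current-question counter in one stateful loop; B instead recursively splits the line list at 'Correct Answer' delimiter lines into segments, joins each segment, and numbers the segments afterwards.
import Mathlib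
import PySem

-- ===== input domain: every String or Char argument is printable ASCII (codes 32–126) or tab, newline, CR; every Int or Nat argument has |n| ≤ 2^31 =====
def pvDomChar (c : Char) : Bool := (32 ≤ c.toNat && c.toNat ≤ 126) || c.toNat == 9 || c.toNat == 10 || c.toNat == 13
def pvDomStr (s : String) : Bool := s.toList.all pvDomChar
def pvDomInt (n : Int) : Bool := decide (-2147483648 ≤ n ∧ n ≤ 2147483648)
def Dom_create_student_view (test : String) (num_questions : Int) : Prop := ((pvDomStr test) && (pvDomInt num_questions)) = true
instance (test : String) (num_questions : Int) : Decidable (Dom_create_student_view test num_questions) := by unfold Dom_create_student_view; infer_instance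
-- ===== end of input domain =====

-- B replaces A's stateful dict-accumulating loop by a recursive split of the line
-- list at 'Correct Answer' delimiter lines followed by numbering the segments
-- (objective: alternative decomposition, same cost).

-- ===== PORT A =====
def create_student_view (test : String) (num_questions : Int) : List (Int × String) :=
  let final := ((PySem.Str.split? test "\n").getD []).foldl
    (fun (st : PySem.Dict Int String × Int) line =>
      if !(PySem.Str.startswith line "Correct Answer") then
        (st.1.insert st.2 ((st.1.getD st.2 "") ++ line ++ "\n"), st.2)
      else if st.2 < num_questions then
        (st.1.insert (st.2 + 1) "", st.2 + 1)
      else st)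
    (PySem.Dict.ofList [(1, "")], 1)
  final.1.items

-- ===== PORT B =====
-- helper of B: find the first 'Correct Answer' line; return (lines before it, lines after it)
def pvSplitFirst : List String → Option (List String × List String)
  | [] => none
  | l :: ls =>
    if PySem.Str.startswith l "Correct Answer" then some ([], ls)
    else match pvSplitFirst ls with
      | some (pre, rest) => some (l :: pre, rest)
      | none => none

-- ''.join(x + '\n' for x in ls)
def pvJoinNL (ls : List String) : String := String.join (ls.map (fun x => x ++ "\n"))

def pvBuild (lines : List String) (remaining : Int) : List String :=
  if 1 < remaining then
    match pvSplitFirst lines with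
    | some (pre, rest) => pvJoinNL pre :: pvBuild rest (remaining - 1)
    | none => [pvJoinNL (lines.filter (fun l => !PySem.Str.startswith l "Correct Answer"))]
  else [pvJoinNL (lines.filter (fun l => !PySem.Str.startswith l "Correct Answer"))]
termination_by remaining.toNat
decreasing_by omega

def create_student_view_alt (test : String) (num_questions : Int) : List (Int × String) :=
  (PySem.List.enumerate (pvBuild ((PySem.Str.split? test "\n").getD []) num_questions) 0).map
    (fun p => (p.1 + 1, p.2))

-- ===== PRECONDITION & SPEC =====
def Spec_create_student_view (test : String) (num_questions : Int) (out : List (Int × String)) : Prop := out = create_student_view_alt test num_questions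
instance (test : String) (num_questions : Int) (out : List (Int × String)) : Decidable (Spec_create_student_view test num_questions out) := by unfold Spec_create_student_view; infer_instance

-- ===== CLAIM (what is proved, stated in full; the proofs are below) =====
def Claim_equal_create_student_view : Prop := ∀ (test : String) (num_questions : Int), Dom_create_student_view test num_questions → Spec_create_student_view test num_questions (create_student_view test num_questions)

-- ===== LEMMAS AND PROOFS =====

-- proof helpers: number segments q, q+1, …; prepend a string onto the first segment
def pvNumber (q : Int) : List String → List (Int × String)
  | [] => []
  | s :: ss => (q, s) :: pvNumber (q + 1) ss

def pvPrepend (c : String) : List String → List String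
  | [] => []
  | s :: ss => (c ++ s) :: ss

-- A's loop body, named so the invariant lemma can speak about it
def pvStepA (num_questions : Int) (st : PySem.Dict Int String × Int) (line : String) :
    PySem.Dict Int String × Int :=
  if !(PySem.Str.startswith line "Correct Answer") then
    (st.1.insert st.2 ((st.1.getD st.2 "") ++ line ++ "\n"), st.2)
  else if st.2 < num_questions then
    (st.1.insert (st.2 + 1) "", st.2 + 1)
  else st

lemma pvPrepend_empty (ls : List String) : pvPrepend "" ls = ls := by
  cases ls <;> simp [pvPrepend]

lemma pvPrepend_prepend (a b : String) (ls : List String) :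
    pvPrepend a (pvPrepend b ls) = pvPrepend (a ++ b) ls := by
  cases ls <;> simp [pvPrepend, String.append_assoc]

lemma pvJoinNL_nil : pvJoinNL [] = "" := rfl

lemma pvJoinNL_cons (l : String) (ls : List String) :
    pvJoinNL (l :: ls) = l ++ "\n" ++ pvJoinNL ls := by
  simp [pvJoinNL, String.join_eq, String.append_assoc]
  rw [← String.ofList_append]
  rfl

lemma pvBuild_nil (r : Int) : pvBuild [] r = [""] := by
  rw [pvBuild]
  split <;> simp [pvSplitFirst, pvJoinNL_nil]

lemma pvBuild_cons_nonCA (line : String) (rest : List String) (r : Int)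
    (h : PySem.Str.startswith line "Correct Answer" = false) :
    pvBuild (line :: rest) r = pvPrepend (line ++ "\n") (pvBuild rest r) := by
  have h : PySem.Chars.startswith line.toList ['C','o','r','r','e','c','t',' ','A','n','s','w','e','r'] = false := by simpa using h
  rw [pvBuild]
  conv_rhs => rw [pvBuild]
  by_cases hr : 1 < r
  · simp only [if_pos hr, pvSplitFirst]
    cases hsf : pvSplitFirst rest with
    | some pr =>
      obtain ⟨pre, rest2⟩ := pr
      simp [h, pvJoinNL_cons, pvPrepend, String.append_assoc]
    | none =>
      simp [h, pvPrepend, pvJoinNL_cons, String.append_assoc]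
  · simp [hr, pvPrepend, h, pvJoinNL_cons, String.append_assoc]

lemma pvBuild_cons_CA_lt (line : String) (rest : List String) (r : Int)
    (h : PySem.Str.startswith line "Correct Answer" = true) (hr : 1 < r) :
    pvBuild (line :: rest) r = "" :: pvBuild rest (r - 1) := by
  have h : PySem.Chars.startswith line.toList ['C','o','r','r','e','c','t',' ','A','n','s','w','e','r'] = true := by simpa using h
  rw [pvBuild]
  simp [hr, pvSplitFirst, h, pvJoinNL_nil]

lemma pvBuild_cons_CA_ge (line : String) (rest : List String) (r : Int)
    (h : PySem.Str.startswith line "Correct Answer" = true) (hr : ¬ 1 < r) :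
    pvBuild (line :: rest) r = pvBuild rest r := by
  have h : PySem.Chars.startswith line.toList ['C','o','r','r','e','c','t',' ','A','n','s','w','e','r'] = true := by simpa using h
  rw [pvBuild]
  conv_rhs => rw [pvBuild]
  simp [hr, h]

-- Dict facts for the loop's invariant shape: items = completed entries ++ [(current key, current text)]
lemma pvGetD_shape (done : List (Int × String)) (q : Int) (cur d0 : String)
    (h : ∀ p ∈ done, p.1 ≠ q) :
    (PySem.Dict.mk (done ++ [(q, cur)])).getD q d0 = cur := by
  induction done with
  | nil => simp [PySem.Dict.getD_eq_get?_getD, PySem.Dict.get?_mk_cons]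
  | cons p ps ih =>
    obtain ⟨k, w⟩ := p
    have hp : k ≠ q := h (k, w) (by simp)
    simp only [List.cons_append, PySem.Dict.getD_eq_get?_getD, PySem.Dict.get?_mk_cons]
    rw [if_neg (by simpa using hp)]
    rw [← PySem.Dict.getD_eq_get?_getD]
    exact ih (fun p hp => h p (by simp [hp]))

lemma pvInsert_self_shape (done : List (Int × String)) (q : Int) (cur v : String)
    (h : ∀ p ∈ done, p.1 ≠ q) :
    (PySem.Dict.mk (done ++ [(q, cur)])).insert q v = PySem.Dict.mk (done ++ [(q, v)]) := by
  have hc : (PySem.Dict.mk (done ++ [(q, cur)])).contains q = true := by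
    rw [PySem.Dict.contains_iff_mem_keys]; simp [PySem.Dict.keys]
  apply PySem.Dict.ext
  rw [PySem.Dict.items_insert_of_contains _ _ hc]
  show List.map _ (done ++ [(q, cur)]) = done ++ [(q, v)]
  rw [List.map_append]
  congr 1
  · rw [show done = List.map id done by simp]
    rw [List.map_map]
    apply List.map_congr_left
    intro p hp
    simp only [Function.comp, id]
    rw [if_neg (by simpa using h p hp)]
  · simp

lemma pvInsert_fresh_shape (done : List (Int × String)) (q k : Int) (cur v : String)
    (h : ∀ p ∈ done, p.1 ≠ k) (hq : q ≠ k) :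
    (PySem.Dict.mk (done ++ [(q, cur)])).insert k v
      = PySem.Dict.mk ((done ++ [(q, cur)]) ++ [(k, v)]) := by
  have hc : (PySem.Dict.mk (done ++ [(q, cur)])).contains k = false := by
    rw [← Bool.not_eq_true, PySem.Dict.contains_iff_mem_keys]
    simp [PySem.Dict.keys]
    constructor
    · intro w hw
      exact absurd rfl (h (k, w) hw)
    · exact fun hk => absurd hk.symm hq
  apply PySem.Dict.ext
  rw [PySem.Dict.items_insert_of_not_contains _ _ hc]

-- the main loop invariant: A's fold from state (done ++ [(q, cur)], q) produces
-- the completed entries followed by B's segments numbered from q, with cur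
-- prefixed onto the first still-open segment
lemma pvFoldA_key (n : Int) : ∀ (lines : List String) (q : Int) (done : List (Int × String)) (cur : String),
    1 ≤ q →
    done.map Prod.fst = PySem.List.pyRange 1 q 1 →
    (lines.foldl (pvStepA n) (PySem.Dict.mk (done ++ [(q, cur)]), q)).1.items
      = done ++ pvNumber q (pvPrepend cur (pvBuild lines (n - q + 1))) := by
  intro lines
  induction lines with
  | nil =>
    intro q done cur hq hmap
    simp only [List.foldl_nil, pvBuild_nil]
    show done ++ [(q, cur)] = done ++ pvNumber q (pvPrepend cur [""])
    simp [pvPrepend, pvNumber, String.append_empty]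
  | cons line rest ih =>
    intro q done cur hq hmap
    have hlt : ∀ p ∈ done, p.1 < q := by
      intro p hp
      have : p.1 ∈ done.map Prod.fst := List.mem_map_of_mem hp
      rw [hmap] at this
      exact (PySem.List.mem_pyRange_one.mp this).2
    rw [List.foldl_cons]
    by_cases hca : PySem.Str.startswith line "Correct Answer" = true
    · by_cases hlt2 : q < n
      · -- delimiter line, still below num_questions: open question q+1
        have hstep : pvStepA n (PySem.Dict.mk (done ++ [(q, cur)]), q) line
            = (PySem.Dict.mk ((done ++ [(q, cur)]) ++ [(q + 1, "")]), q + 1) := by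
          simp only [pvStepA, hca, Bool.not_true, Bool.false_eq_true, if_false, if_pos hlt2]
          rw [pvInsert_fresh_shape done q (q + 1) cur ""
            (fun p hp => by have := hlt p hp; omega) (by omega)]
        rw [hstep]
        rw [ih (q + 1) (done ++ [(q, cur)]) "" (by omega)
          (by rw [List.map_append, hmap, PySem.List.pyRange_one_succ_right hq]; simp)]
        rw [pvPrepend_empty]
        rw [show n - (q + 1) + 1 = n - q by ring]
        rw [pvBuild_cons_CA_lt line rest _ hca (by omega)]
        rw [show n - q + 1 - 1 = n - q by ring]
        simp [pvPrepend, pvNumber, String.append_empty]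
      · -- delimiter line at or past num_questions: ignored
        have hstep : pvStepA n (PySem.Dict.mk (done ++ [(q, cur)]), q) line
            = (PySem.Dict.mk (done ++ [(q, cur)]), q) := by
          have hca' : PySem.Chars.startswith line.toList ['C','o','r','r','e','c','t',' ','A','n','s','w','e','r'] = true := by simpa using hca
          simp [pvStepA, hca', hlt2]
        rw [hstep, ih q done cur hq hmap,
          pvBuild_cons_CA_ge line rest _ hca (by omega)]
    · -- ordinary line: append it to the open question
      rw [Bool.not_eq_true] at hca
      have hstep : pvStepA n (PySem.Dict.mk (done ++ [(q, cur)]), q) line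
          = (PySem.Dict.mk (done ++ [(q, cur ++ line ++ "\n")]), q) := by
        simp only [pvStepA, hca, Bool.not_false, if_pos]
        rw [pvGetD_shape done q cur "" (fun p hp => by have := hlt p hp; omega),
          pvInsert_self_shape done q cur _ (fun p hp => by have := hlt p hp; omega)]
      rw [hstep, ih q done (cur ++ line ++ "\n") hq hmap,
        pvBuild_cons_nonCA line rest _ hca, pvPrepend_prepend,
        show cur ++ (line ++ "\n") = cur ++ line ++ "\n" from String.append_assoc.symm]

lemma pvEnumerate_number : ∀ (parts : List String) (s : Int),
    (PySem.List.enumerate parts s).map (fun p => (p.1 + 1, p.2)) = pvNumber (s + 1) parts := by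
  intro parts
  induction parts with
  | nil => intro s; simp [PySem.List.enumerate_nil, pvNumber]
  | cons p ps ih =>
    intro s
    rw [PySem.List.enumerate_cons]
    simp only [List.map_cons, pvNumber, ih (s + 1)]

-- ===== VERDICT (by name: the statement is the Claim_ definition above) =====
theorem create_student_view_spec : Claim_equal_create_student_view := by
  intro test n _
  unfold Spec_create_student_view create_student_view create_student_view_alt
  have hinit : (PySem.Dict.ofList [((1 : Int), "")]) = PySem.Dict.mk (([] : List (Int × String)) ++ [(1, "")]) := by
    rfl
  rw [hinit]
  rw [show (fun (st : PySem.Dict Int String × Int) line =>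
      if !(PySem.Str.startswith line "Correct Answer") then
        (st.1.insert st.2 ((st.1.getD st.2 "") ++ line ++ "\n"), st.2)
      else if st.2 < n then
        (st.1.insert (st.2 + 1) "", st.2 + 1)
      else st) = pvStepA n from rfl]
  rw [pvFoldA_key n _ 1 [] "" (le_refl 1)
    (by simp [PySem.List.pyRange_one_eq_nil (le_refl 1)])]
  rw [pvPrepend_empty, show n - 1 + 1 = n by ring, List.nil_append,
    pvEnumerate_number _ 0]
  norm_num
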